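-- pv_equiv track=rewrite | github.com/zhabaa/Algorithms-and-data-structures | 1st half/lab3.py | foo
-- ===== SOURCE A (Python) =====
-- def foo(x: int):
--     result = []
--     i = 1
--
--     while i <= x:
--         result.append(i)
--         i *= 3
--
--     result = set()
--     a = 1
--
--     while a <= x:
--         b = a
--
--         while b <= x:
--             c = b
--
--             while c <= x:
--                 result.add(c)
--                 c *= 7
--
--             b *= 5
--         a *= 3
--
--     return sorted(result)
-- ===== SOURCE B (Python) =====
-- def foo(x: int):
--     def powers(p):
--         out = []
--         v = 1
--         while v <= x:
--             out.append(v)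
--             v *= p
--         return out
--
--     vals = {a * b * c
--             for a in powers(3)
--             for b in powers(5)
--             for c in powers(7)
--             if a * b * c <= x}
--     return sorted(vals)
-- ===== Notes on version B (the rewrite author's own statement) =====
-- stated objective: alternative
-- what changed: A interleaves nested cumulative-product while-loops (pruning each partial product against x) into one set; B precomputes the geometric power list of each prime factor up to x once, takes their cartesian product filtered by the bound, and sorts the distinct products.
import Mathlib
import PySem

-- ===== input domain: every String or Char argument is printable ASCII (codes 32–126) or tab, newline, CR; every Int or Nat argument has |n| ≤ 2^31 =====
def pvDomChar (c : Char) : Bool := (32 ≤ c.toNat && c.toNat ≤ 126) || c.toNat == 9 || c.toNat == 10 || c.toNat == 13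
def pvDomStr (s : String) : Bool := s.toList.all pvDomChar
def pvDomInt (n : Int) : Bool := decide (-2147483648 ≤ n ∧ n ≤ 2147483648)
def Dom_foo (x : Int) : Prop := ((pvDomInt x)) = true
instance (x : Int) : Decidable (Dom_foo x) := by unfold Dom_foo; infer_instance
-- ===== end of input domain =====

-- B replaces A's cumulative nested while-loops by three precomputed geometric power
-- lists whose filtered cartesian products form the set (alternative decomposition).

-- ===== PORT A =====
-- first while loop of A: builds a list of powers of 3 (dead code — `result` is
-- immediately reassigned to set(); ported for fidelity, its value is unused)
def fooDead (x i : Int) (hi : 1 ≤ i) (acc : List Int) : List Int :=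
  if i ≤ x then fooDead x (i * 3) (by omega) (acc ++ [i]) else acc
termination_by (x + 1 - i).toNat
decreasing_by omega

-- innermost while loop: while c <= x: result.add(c); c *= 7
def fooLoopC (x c : Int) (hc : 1 ≤ c) (s : PySem.Set Int) : PySem.Set Int :=
  if c ≤ x then fooLoopC x (c * 7) (by omega) (PySem.Set.add s c) else s
termination_by (x + 1 - c).toNat
decreasing_by omega

-- middle while loop: while b <= x: <inner loop from c = b>; b *= 5
def fooLoopB (x b : Int) (hb : 1 ≤ b) (s : PySem.Set Int) : PySem.Set Int :=
  if b ≤ x then fooLoopB x (b * 5) (by omega) (fooLoopC x b hb s) else s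
termination_by (x + 1 - b).toNat
decreasing_by omega

-- outer while loop: while a <= x: <middle loop from b = a>; a *= 3
def fooLoopA (x a : Int) (ha : 1 ≤ a) (s : PySem.Set Int) : PySem.Set Int :=
  if a ≤ x then fooLoopA x (a * 3) (by omega) (fooLoopB x a ha s) else s
termination_by (x + 1 - a).toNat
decreasing_by omega

def foo (x : Int) : List Int :=
  let _result := fooDead x 1 (by norm_num) []   -- overwritten by `result = set()`
  PySem.List.sorted (fooLoopA x 1 (by norm_num) PySem.Set.empty) (fun v => v) false

-- ===== PORT B =====
-- powers(p): out = []; v = 1; while v <= x: out.append(v); v *= p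
def fooPowers (x p v : Int) (hp : 2 ≤ p) (hv : 1 ≤ v) (out : List Int) : List Int :=
  if v ≤ x then fooPowers x p (v * p) hp (by nlinarith) (out ++ [v]) else out
termination_by (x + 1 - v).toNat
decreasing_by
  have : v * 2 ≤ v * p := by nlinarith
  omega

def foo_alt (x : Int) : List Int :=
  let p3 := fooPowers x 3 1 (by norm_num) (by norm_num) []
  let p5 := fooPowers x 5 1 (by norm_num) (by norm_num) []
  let p7 := fooPowers x 7 1 (by norm_num) (by norm_num) []
  let vals : PySem.Set Int := PySem.Set.ofList
    (p3.flatMap fun a => p5.flatMap fun b =>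
      (p7.filter fun c => decide (a * b * c ≤ x)).map fun c => a * b * c)
  PySem.List.sorted vals (fun v => v) false

-- ===== PRECONDITION & SPEC =====
def Spec_foo (x : Int) (out : List Int) : Prop := out = foo_alt x
instance (x : Int) (out : List Int) : Decidable (Spec_foo x out) := by unfold Spec_foo; infer_instance

-- ===== CLAIM (what is proved, stated in full; the proofs are below) =====
def Claim_equal_foo : Prop := ∀ (x : Int), Dom_foo x → Spec_foo x (foo x)

-- ===== LEMMAS AND PROOFS =====

theorem foo_one_le_mul (a b : Int) (ha : 1 ≤ a) (hb : 1 ≤ b) : 1 ≤ a * b := by nlinarith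

theorem foo_factor_le (x t r : Int) (ht : 1 ≤ t) (hr : 1 ≤ r) (h : t * r ≤ x) : t ≤ x := by
  nlinarith

theorem mem_fooLoopC (x u : Int) (c : Int) (hc : 1 ≤ c) (s : PySem.Set Int) :
    u ∈ fooLoopC x c hc s ↔ u ∈ s ∨ ∃ k : ℕ, u = c * 7 ^ k ∧ u ≤ x := by
  fun_induction fooLoopC x c hc s with
  | case1 c hc s h ih =>
    rw [ih]
    constructor
    · rintro (hu | ⟨k, rfl, hle⟩)
      · rcases (PySem.Set.mem_add _ _ _).1 hu with hu | rfl
        · exact Or.inl hu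
        · exact Or.inr ⟨0, by ring, h⟩
      · exact Or.inr ⟨k + 1, by ring, hle⟩
    · rintro (hu | ⟨k, rfl, hle⟩)
      · exact Or.inl ((PySem.Set.mem_add _ _ _).2 (Or.inl hu))
      · cases k with
        | zero => exact Or.inl ((PySem.Set.mem_add _ _ _).2 (Or.inr (by ring)))
        | succ k => exact Or.inr ⟨k, by ring, hle⟩
  | case2 c hc s h =>
    constructor
    · exact Or.inl
    · rintro (hu | ⟨k, rfl, hle⟩)
      · exact hu
      · have h7 : (1 : Int) ≤ 7 ^ k := one_le_pow₀ (by norm_num)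
        exact absurd (foo_factor_le x c (7 ^ k) hc h7 hle) h

theorem mem_fooLoopB (x u : Int) (b : Int) (hb : 1 ≤ b) (s : PySem.Set Int) :
    u ∈ fooLoopB x b hb s ↔ u ∈ s ∨ ∃ j k : ℕ, u = b * 5 ^ j * 7 ^ k ∧ u ≤ x := by
  fun_induction fooLoopB x b hb s with
  | case1 b hb s h ih =>
    rw [ih, mem_fooLoopC]
    constructor
    · rintro ((hu | ⟨k, rfl, hle⟩) | ⟨j, k, rfl, hle⟩)
      · exact Or.inl hu
      · exact Or.inr ⟨0, k, by ring, hle⟩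
      · exact Or.inr ⟨j + 1, k, by ring, hle⟩
    · rintro (hu | ⟨j, k, rfl, hle⟩)
      · exact Or.inl (Or.inl hu)
      · cases j with
        | zero => exact Or.inl (Or.inr ⟨k, by ring, hle⟩)
        | succ j => exact Or.inr ⟨j, k, by ring, hle⟩
  | case2 b hb s h =>
    constructor
    · exact Or.inl
    · rintro (hu | ⟨j, k, rfl, hle⟩)
      · exact hu
      · have h5 : (1 : Int) ≤ 5 ^ j := one_le_pow₀ (by norm_num)
        have h7 : (1 : Int) ≤ 7 ^ k := one_le_pow₀ (by norm_num)
        rw [mul_assoc] at hle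
        exact absurd (foo_factor_le x b _ hb (foo_one_le_mul _ _ h5 h7) hle) h

theorem mem_fooLoopA (x u : Int) (a : Int) (ha : 1 ≤ a) (s : PySem.Set Int) :
    u ∈ fooLoopA x a ha s ↔
      u ∈ s ∨ ∃ i j k : ℕ, u = a * 3 ^ i * 5 ^ j * 7 ^ k ∧ u ≤ x := by
  fun_induction fooLoopA x a ha s with
  | case1 a ha s h ih =>
    rw [ih, mem_fooLoopB]
    constructor
    · rintro ((hu | ⟨j, k, rfl, hle⟩) | ⟨i, j, k, rfl, hle⟩)
      · exact Or.inl hu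
      · exact Or.inr ⟨0, j, k, by ring, hle⟩
      · exact Or.inr ⟨i + 1, j, k, by ring, hle⟩
    · rintro (hu | ⟨i, j, k, rfl, hle⟩)
      · exact Or.inl (Or.inl hu)
      · cases i with
        | zero => exact Or.inl (Or.inr ⟨j, k, by ring, hle⟩)
        | succ i => exact Or.inr ⟨i, j, k, by ring, hle⟩
  | case2 a ha s h =>
    constructor
    · exact Or.inl
    · rintro (hu | ⟨i, j, k, rfl, hle⟩)
      · exact hu
      · have h3 : (1 : Int) ≤ 3 ^ i := one_le_pow₀ (by norm_num)
        have h5 : (1 : Int) ≤ 5 ^ j := one_le_pow₀ (by norm_num)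
        have h7 : (1 : Int) ≤ 7 ^ k := one_le_pow₀ (by norm_num)
        rw [mul_assoc, mul_assoc] at hle
        exact absurd
          (foo_factor_le x a _ ha (foo_one_le_mul _ _ h3 (foo_one_le_mul _ _ h5 h7)) hle) h

theorem nodup_fooLoopC (x : Int) (c : Int) (hc : 1 ≤ c) (s : PySem.Set Int)
    (hs : s.Nodup) : (fooLoopC x c hc s).Nodup := by
  fun_induction fooLoopC x c hc s with
  | case1 c hc s h ih => exact ih (PySem.Set.nodup_add _ _ hs)
  | case2 c hc s h => exact hs

theorem nodup_fooLoopB (x : Int) (b : Int) (hb : 1 ≤ b) (s : PySem.Set Int)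
    (hs : s.Nodup) : (fooLoopB x b hb s).Nodup := by
  fun_induction fooLoopB x b hb s with
  | case1 b hb s h ih => exact ih (nodup_fooLoopC x b hb s hs)
  | case2 b hb s h => exact hs

theorem nodup_fooLoopA (x : Int) (a : Int) (ha : 1 ≤ a) (s : PySem.Set Int)
    (hs : s.Nodup) : (fooLoopA x a ha s).Nodup := by
  fun_induction fooLoopA x a ha s with
  | case1 a ha s h ih => exact ih (nodup_fooLoopB x a ha s hs)
  | case2 a ha s h => exact hs

theorem mem_fooPowers (x p u : Int) (hp : 2 ≤ p) (v : Int) (hv : 1 ≤ v) (out : List Int) :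
    u ∈ fooPowers x p v hp hv out ↔ u ∈ out ∨ ∃ k : ℕ, u = v * p ^ k ∧ u ≤ x := by
  fun_induction fooPowers x p v hp hv out with
  | case1 v hv out h ih =>
    rw [ih]
    constructor
    · rintro (hu | ⟨k, rfl, hle⟩)
      · rcases List.mem_append.1 hu with hu | hu
        · exact Or.inl hu
        · exact Or.inr ⟨0, by simpa using List.mem_singleton.1 hu, by
            rw [List.mem_singleton.1 hu]; exact h⟩
      · exact Or.inr ⟨k + 1, by ring, hle⟩
    · rintro (hu | ⟨k, rfl, hle⟩)
      · exact Or.inl (List.mem_append.2 (Or.inl hu))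
      · cases k with
        | zero => exact Or.inl (List.mem_append.2 (Or.inr (List.mem_singleton.2 (by ring))))
        | succ k => exact Or.inr ⟨k, by ring, hle⟩
  | case2 v hv out h =>
    constructor
    · exact Or.inl
    · rintro (hu | ⟨k, rfl, hle⟩)
      · exact hu
      · have hpk : (1 : Int) ≤ p ^ k := one_le_pow₀ (by omega)
        exact absurd (foo_factor_le x v (p ^ k) hv hpk hle) h

theorem foo_sets_same_mem (x u : Int) :
    u ∈ fooLoopA x 1 (by norm_num) PySem.Set.empty ↔
      u ∈ ((fooPowers x 3 1 (by norm_num) (by norm_num) []).flatMap fun a =>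
            (fooPowers x 5 1 (by norm_num) (by norm_num) []).flatMap fun b =>
              (((fooPowers x 7 1 (by norm_num) (by norm_num) []).filter
                  fun c => decide (a * b * c ≤ x)).map fun c => a * b * c)) := by
  rw [mem_fooLoopA]
  constructor
  · rintro (hu | ⟨i, j, k, rfl, hle⟩)
    · exact absurd hu (List.not_mem_nil)
    · have h3 : (1 : Int) ≤ 3 ^ i := one_le_pow₀ (by norm_num)
      have h5 : (1 : Int) ≤ 5 ^ j := one_le_pow₀ (by norm_num)
      have h7 : (1 : Int) ≤ 7 ^ k := one_le_pow₀ (by norm_num)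
      have hle' : 3 ^ i * (5 ^ j * 7 ^ k) ≤ x := by ring_nf at hle ⊢; linarith
      have hle5 : 5 ^ j * (3 ^ i * 7 ^ k) ≤ x := by ring_nf at hle ⊢; linarith
      have hle7 : 7 ^ k * (3 ^ i * 5 ^ j) ≤ x := by ring_nf at hle ⊢; linarith
      refine List.mem_flatMap.2 ⟨1 * 3 ^ i,
        (mem_fooPowers x 3 _ (by norm_num) 1 (by norm_num) []).2 (Or.inr ⟨i, rfl, ?_⟩),
        List.mem_flatMap.2 ⟨1 * 5 ^ j,
          (mem_fooPowers x 5 _ (by norm_num) 1 (by norm_num) []).2 (Or.inr ⟨j, rfl, ?_⟩),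
          List.mem_map.2 ⟨1 * 7 ^ k, List.mem_filter.2
            ⟨(mem_fooPowers x 7 _ (by norm_num) 1 (by norm_num) []).2 (Or.inr ⟨k, rfl, ?_⟩),
             decide_eq_true (by ring_nf; ring_nf at hle; linarith)⟩, by ring⟩⟩⟩
      · have := foo_factor_le x (3 ^ i) _ h3 (foo_one_le_mul _ _ h5 h7) hle'
        linarith
      · have := foo_factor_le x (5 ^ j) _ h5 (foo_one_le_mul _ _ h3 h7) hle5
        linarith
      · have := foo_factor_le x (7 ^ k) _ h7 (foo_one_le_mul _ _ h3 h5) hle7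
        linarith
  · intro hu
    rcases List.mem_flatMap.1 hu with ⟨a, ha, hu⟩
    rcases List.mem_flatMap.1 hu with ⟨b, hb, hu⟩
    rcases List.mem_map.1 hu with ⟨c, hc, rfl⟩
    rcases List.mem_filter.1 hc with ⟨hc7, hcond⟩
    rcases ((mem_fooPowers x 3 _ (by norm_num) 1 (by norm_num) []).1 ha) with h | ⟨i, rfl, _⟩
    · exact absurd h (List.not_mem_nil)
    rcases ((mem_fooPowers x 5 _ (by norm_num) 1 (by norm_num) []).1 hb) with h | ⟨j, rfl, _⟩
    · exact absurd h (List.not_mem_nil)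
    rcases ((mem_fooPowers x 7 _ (by norm_num) 1 (by norm_num) []).1 hc7) with h | ⟨k, rfl, _⟩
    · exact absurd h (List.not_mem_nil)
    exact Or.inr ⟨i, j, k, by ring, of_decide_eq_true hcond⟩

-- ===== VERDICT (by name: the statement is the Claim_ definition above) =====
theorem foo_spec : Claim_equal_foo := by
  intro x _
  show foo x = foo_alt x
  simp only [foo, foo_alt]
  apply PySem.List.sorted_eq_sorted_of_perm _ _ _ (fun _ _ h => h)
  refine (List.perm_ext_iff_of_nodup ?_ ?_).2 ?_
  · exact nodup_fooLoopA x 1 (by norm_num) PySem.Set.empty List.nodup_nil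
  · exact PySem.Set.nodup_ofList _
  · intro u
    rw [PySem.Set.mem_ofList]
    exact foo_sets_same_mem x u
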